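-- pv_equiv track=rewrite | github.com/jJup0/LeetCode | Medium/2560. House Robber IV.py | _can_steal_capacity
-- ===== SOURCE A (Python) =====
-- def _can_steal_capacity(nums: list[int], capacity: int, k: int):
--     steals = 0
--     stole_prev = False
--     for num in nums:
--         if num > capacity or stole_prev:
--             stole_prev = False
--             continue
--
--         steals += 1
--         stole_prev = True
--         if steals == k:
--             return True
--     return False
-- ===== SOURCE B (Python) =====
-- def _can_steal_capacity(nums: list[int], capacity: int, k: int):
--     # House-Robber DP: b = max number of non-adjacent stealable houses in the
--     # prefix seen so far, a = same for the prefix one element shorter.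
--     a = b = 0
--     for num in nums:
--         cur = b
--         if num <= capacity:
--             cur = max(b, a + 1)
--         a, b = b, cur
--     return 1 <= k <= b
-- ===== Notes on version B (the rewrite author's own statement) =====
-- stated objective: alternative
-- what changed: Replaces the greedy flag-and-early-return pass by a House-Robber dynamic program that computes the maximum number of non-adjacent stealable houses and compares it with k at the end.
import Mathlib
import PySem

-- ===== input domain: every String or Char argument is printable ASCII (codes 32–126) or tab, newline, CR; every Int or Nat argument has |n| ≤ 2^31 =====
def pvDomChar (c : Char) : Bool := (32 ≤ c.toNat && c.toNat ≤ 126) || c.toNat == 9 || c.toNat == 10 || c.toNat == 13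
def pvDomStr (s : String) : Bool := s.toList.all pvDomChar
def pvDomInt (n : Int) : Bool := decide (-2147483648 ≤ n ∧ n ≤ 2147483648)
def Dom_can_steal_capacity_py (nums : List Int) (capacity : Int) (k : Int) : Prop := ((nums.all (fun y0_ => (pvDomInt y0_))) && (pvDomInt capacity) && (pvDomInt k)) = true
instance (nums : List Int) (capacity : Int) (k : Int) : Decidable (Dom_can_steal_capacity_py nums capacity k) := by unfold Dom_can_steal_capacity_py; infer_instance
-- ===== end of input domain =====

-- B replaces A's greedy early-return pass by a House-Robber DP over the whole list; return value only, not faster.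

-- ===== PORT A =====
-- A's loop with early return: state (steals, stole_prev)
def pvGoA (nums : List Int) (capacity : Int) (k : Int) (steals : Int) (stole_prev : Bool) : Bool :=
  match nums with
  | [] => false
  | num :: rest =>
    if num > capacity || stole_prev then
      pvGoA rest capacity k steals false
    else
      if steals + 1 == k then true
      else pvGoA rest capacity k (steals + 1) true

def can_steal_capacity_py (nums : List Int) (capacity : Int) (k : Int) : Bool :=
  pvGoA nums capacity k 0 false

-- ===== PORT B =====
-- B's DP loop: state (a, b) = best counts for the two latest prefixes
def pvGoB (nums : List Int) (capacity : Int) (a b : Int) : Int × Int :=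
  match nums with
  | [] => (a, b)
  | num :: rest =>
    let cur := if num ≤ capacity then max b (a + 1) else b
    pvGoB rest capacity b cur

def can_steal_capacity_py_alt (nums : List Int) (capacity : Int) (k : Int) : Bool :=
  decide (1 ≤ k ∧ k ≤ (pvGoB nums capacity 0 0).2)

-- ===== PRECONDITION & SPEC =====
def Spec_can_steal_capacity_py (nums : List Int) (capacity : Int) (k : Int) (out : Bool) : Prop := out = can_steal_capacity_py_alt nums capacity k
instance (nums : List Int) (capacity : Int) (k : Int) (out : Bool) : Decidable (Spec_can_steal_capacity_py nums capacity k out) := by unfold Spec_can_steal_capacity_py; infer_instance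

-- ===== CLAIM (what is proved, stated in full; the proofs are below) =====
def Claim_equal_can_steal_capacity_py : Prop := ∀ (nums : List Int) (capacity : Int) (k : Int), Dom_can_steal_capacity_py nums capacity k → Spec_can_steal_capacity_py nums capacity k (can_steal_capacity_py nums capacity k)

-- ===== LEMMAS AND PROOFS =====

-- the greedy count A's loop would reach without the early exit
def pvGreedy (nums : List Int) (capacity : Int) (steals : Int) (stole_prev : Bool) : Int :=
  match nums with
  | [] => steals
  | num :: rest =>
    if num > capacity || stole_prev then pvGreedy rest capacity steals false
    else pvGreedy rest capacity (steals + 1) true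

theorem pvGreedy_ge (nums : List Int) (capacity : Int) :
    ∀ (s : Int) (p : Bool), s ≤ pvGreedy nums capacity s p := by
  induction nums with
  | nil => intro s p; simp [pvGreedy]
  | cons num rest ih =>
    intro s p
    simp only [pvGreedy]
    split
    · exact ih s false
    · exact le_trans (by omega) (ih (s + 1) true)

theorem pvGoA_eq (nums : List Int) (capacity k : Int) :
    ∀ (s : Int) (p : Bool),
      pvGoA nums capacity k s p = decide (s < k ∧ k ≤ pvGreedy nums capacity s p) := by
  induction nums with
  | nil => intro s p; simp [pvGoA, pvGreedy]
  | cons num rest ih =>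
    intro s p
    simp only [pvGoA, pvGreedy]
    split
    · exact ih s false
    · by_cases hk : s + 1 = k
      · subst hk
        have h2 := pvGreedy_ge rest capacity (s + 1) true
        have hc : (s < s + 1 ∧ s + 1 ≤ pvGreedy rest capacity (s + 1) true) := ⟨by omega, h2⟩
        simp [hc]
      · have h1 : (s + 1 == k) = false := by simp [hk]
        simp only [h1, Bool.false_eq_true, if_false]
        rw [ih (s + 1) true]
        have h2 := pvGreedy_ge rest capacity (s + 1) true
        rw [decide_eq_decide]
        omega

theorem pvGoB_eq (nums : List Int) (capacity : Int) :
    ∀ (b : Int) (p : Bool),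
      (pvGoB nums capacity (b - (if p then 1 else 0)) b).2 = pvGreedy nums capacity b p := by
  induction nums with
  | nil => intro b p; simp [pvGoB, pvGreedy]
  | cons num rest ih =>
    intro b p
    simp only [pvGoB, pvGreedy]
    by_cases he : num ≤ capacity
    · have hgt : ¬ num > capacity := by omega
      cases p with
      | false =>
        have hcur : (if num ≤ capacity then max b (b - (if false then 1 else 0) + 1) else b) = b + 1 := by
          rw [if_pos he]; norm_num
        rw [hcur]
        have h := ih (b + 1) true
        have hb : b + 1 - (if true then 1 else 0) = b := by norm_num
        rw [hb] at h
        simpa [hgt] using h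
      | true =>
        have hcur : (if num ≤ capacity then max b (b - (if true then 1 else 0) + 1) else b) = b := by
          rw [if_pos he]; norm_num
        rw [hcur]
        have h := ih b false
        have hb : b - (if false then 1 else 0) = b := by norm_num
        rw [hb] at h
        simpa using h
    · have hgt : num > capacity := by omega
      have hcur : (if num ≤ capacity then max b (b - (if p then 1 else 0) + 1) else b) = b := by
        rw [if_neg he]
      rw [hcur]
      have h := ih b false
      have hb : b - (if false then 1 else 0) = b := by norm_num
      rw [hb] at h
      simpa [hgt] using h

-- ===== VERDICT (by name: the statement is the Claim_ definition above) =====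
theorem can_steal_capacity_py_spec : Claim_equal_can_steal_capacity_py := by
  intro nums capacity k _
  unfold Spec_can_steal_capacity_py can_steal_capacity_py can_steal_capacity_py_alt
  rw [pvGoA_eq]
  have h := pvGoB_eq nums capacity 0 false
  norm_num at h
  rw [h, decide_eq_decide]
  omega
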